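-- pv_equiv track=rewrite | github.com/TylerMorley/advent-of-code | 2023/code/day09.py | getAllDifferences
-- ===== SOURCE A (Python) =====
-- def getDifferences(line):
--     differences = []
--     cur_val = line[0]
--     for i in range(1,len(line)):
--         differences.append(line[i] - cur_val)
--         cur_val = line[i]
--
--     return differences
--
-- def hasAllZeros(line):
--     return line == [0] * len(line)
--
-- def getAllDifferences(line):
--     all_differences = [line]
--     isZeros = False
--     while isZeros == False:
--         new_line = getDifferences(all_differences[-1])
--         all_differences.append(new_line)
--         if hasAllZeros(new_line):
--             isZeros = True
--
--     return all_differences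
-- ===== SOURCE B (Python) =====
-- def getAllDifferences(line):
--     diff = [b - a for a, b in zip(line, line[1:])]
--     if all(d == 0 for d in diff):
--         return [line, diff]
--     return [line] + getAllDifferences(diff)
-- ===== Notes on version B (the rewrite author's own statement) =====
-- stated objective: simpler
-- what changed: Replaces the outer while loop with its mutable flag and growing accumulator by direct recursion on the difference row, and replaces the index-based differencing loop by a zip comprehension.
-- crash fix: On the empty list A raises IndexError (line[0]); B returns [[], []]. — e.g. on getAllDifferences([]): A raises IndexError, B returns [[], []]
import Mathlib
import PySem

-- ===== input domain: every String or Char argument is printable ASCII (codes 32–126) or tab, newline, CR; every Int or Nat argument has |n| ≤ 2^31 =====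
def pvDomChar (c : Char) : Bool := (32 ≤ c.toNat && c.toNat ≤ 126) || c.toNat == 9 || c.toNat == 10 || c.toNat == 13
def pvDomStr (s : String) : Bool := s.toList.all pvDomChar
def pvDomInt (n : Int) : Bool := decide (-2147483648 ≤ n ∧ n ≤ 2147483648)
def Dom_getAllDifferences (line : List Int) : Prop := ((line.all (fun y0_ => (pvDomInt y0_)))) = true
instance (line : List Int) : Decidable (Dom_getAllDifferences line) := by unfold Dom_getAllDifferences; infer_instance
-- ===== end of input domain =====

-- B replaces A's while loop (mutable flag + growing accumulator) by direct recursion on the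
-- difference row, and the index loop in getDifferences by a zip comprehension; objective: simpler.

-- ===== PORT A =====
-- getDifferences: cur_val = line[0] (IndexError on []); for i in range(1, len(line)): append line[i]-cur_val
def getDifferencesA (line : List Int) : List Int :=
  match line with
  | [] => []   -- Python raises IndexError here; excluded by Pre_ (loop below never reaches it either)
  | x :: _ =>
    ((PySem.List.pyRange 1 (line.length : Int) 1).foldl
      (fun (st : List Int × Int) i =>
        (st.1 ++ [PySem.List.pyGetD line i 0 - st.2], PySem.List.pyGetD line i 0))
      ([], x)).1

def hasAllZerosA (line : List Int) : Bool := line == List.replicate line.length 0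

theorem getDifferencesA_length_lt (cur : List Int) (h : hasAllZerosA (getDifferencesA cur) = false) :
    (getDifferencesA cur).length < cur.length := by
  cases cur with
  | nil => simp [getDifferencesA, hasAllZerosA] at h
  | cons x xs =>
    have : (getDifferencesA (x :: xs)).length ≤ xs.length := by
      simp only [getDifferencesA]
      have : ∀ (r : List Int) (acc : List Int) (c : Int),
          ((r.foldl (fun (st : List Int × Int) i =>
            (st.1 ++ [PySem.List.pyGetD (x :: xs) i 0 - st.2], PySem.List.pyGetD (x :: xs) i 0))
            (acc, c)).1).length = acc.length + r.length := by
        intro r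
        induction r with
        | nil => intro acc c; simp
        | cons a as ih => intro acc c; simp [List.foldl, ih]; omega
      rw [this]
      simp [PySem.List.length_pyRange_one]
    simp only [List.length_cons]
    omega

-- while loop of A: repeatedly take differences of the last row, append, stop on all zeros
def loopA (cur : List Int) (acc : List (List Int)) : List (List Int) :=
  let new_line := getDifferencesA cur
  let acc' := acc ++ [new_line]
  if h : hasAllZerosA new_line then acc' else loopA new_line acc'
termination_by cur.length
decreasing_by exact getDifferencesA_length_lt cur (by simpa using h)

def getAllDifferences (line : List Int) : List (List Int) := loopA line [line]

-- ===== PORT B =====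
def getDifferencesB (line : List Int) : List Int :=
  (List.zip line (line.drop 1)).map (fun p => p.2 - p.1)

theorem getDifferencesB_length_lt (cur : List Int) (h : (getDifferencesB cur).all (fun d => d == 0) = false) :
    (getDifferencesB cur).length < cur.length := by
  cases cur with
  | nil => simp [getDifferencesB] at h
  | cons x xs => simp [getDifferencesB]

def getAllDifferences_alt (line : List Int) : List (List Int) :=
  let diff := getDifferencesB line
  if h : diff.all (fun d => d == 0) then [line, diff]
  else line :: getAllDifferences_alt diff
termination_by line.length
decreasing_by exact getDifferencesB_length_lt line (by simpa using h)

-- ===== PRECONDITION & SPEC =====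
-- Pre_ excludes only the empty list, on which Python's A raises IndexError at line[0].
def Pre_getAllDifferences (line : List Int) : Prop := line ≠ []
instance (line : List Int) : Decidable (Pre_getAllDifferences line) := by unfold Pre_getAllDifferences; infer_instance
def pvWitness_getAllDifferences : List Int := ([1, 3, 6])

-- On the empty list A raises IndexError (line[0]); B returns [[], []].
def Raises_getAllDifferences (line : List Int) : Prop := line = []
instance (line : List Int) : Decidable (Raises_getAllDifferences line) := by unfold Raises_getAllDifferences; infer_instance
def pvRaiseWitness_getAllDifferences : List Int := ([])
def pvRaiseWitnessOut_getAllDifferences : List (List Int) := [[], []]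

def Spec_getAllDifferences (line : List Int) (out : List (List Int)) : Prop := out = getAllDifferences_alt line
instance (line : List Int) (out : List (List Int)) : Decidable (Spec_getAllDifferences line out) := by unfold Spec_getAllDifferences; infer_instance

-- ===== CLAIM (what is proved, stated in full; the proofs are below) =====
def Claim_equal_getAllDifferences : Prop := ∀ (line : List Int), Dom_getAllDifferences line → Pre_getAllDifferences line → Spec_getAllDifferences line (getAllDifferences line)
def Claim_raises_getAllDifferences : Prop := (∀ (line : List Int), Dom_getAllDifferences line → Raises_getAllDifferences line → ¬ Pre_getAllDifferences line) ∧ (Dom_getAllDifferences (pvRaiseWitness_getAllDifferences) ∧ Raises_getAllDifferences (pvRaiseWitness_getAllDifferences) ∧ getAllDifferences_alt (pvRaiseWitness_getAllDifferences) = pvRaiseWitnessOut_getAllDifferences)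

-- ===== LEMMAS AND PROOFS =====

-- the two differencing helpers agree
theorem diffA_eq_diffB (line : List Int) : getDifferencesA line = getDifferencesB line := by
  cases line with
  | nil => simp [getDifferencesA, getDifferencesB]
  | cons x xs =>
    simp only [getDifferencesA]
    rw [PySem.List.foldl_pyRange_pyGetD' (x :: xs) 0
      (fun (st : List Int × Int) v => (st.1 ++ [v - st.2], v)) ([], x) (by omega : (0:Int) ≤ 1)]
    simp only [Int.toNat_one, List.drop_succ_cons, List.drop_zero]
    -- now: (xs.foldl (fun st v => (st.1 ++ [v - st.2], v)) ([], x)).1 = getDifferencesB (x :: xs)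
    suffices h : ∀ (xs : List Int) (acc : List Int) (c : Int),
        (xs.foldl (fun (st : List Int × Int) v => (st.1 ++ [v - st.2], v)) (acc, c)).1
          = acc ++ (List.zip (c :: xs) xs).map (fun p => p.2 - p.1) by
      simpa [getDifferencesB] using h xs [] x
    intro xs
    induction xs with
    | nil => intro acc c; simp
    | cons a as ih => intro acc c; simp [List.foldl, ih]

theorem hasAllZerosA_eq (l : List Int) : hasAllZerosA l = l.all (fun d => d == 0) := by
  induction l with
  | nil => simp [hasAllZerosA]
  | cons a as ih =>
    simp only [hasAllZerosA, List.length_cons, List.replicate_succ] at *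
    simp_all

theorem alt_head (line : List Int) :
    getAllDifferences_alt line = line :: (getAllDifferences_alt line).tail := by
  rw [getAllDifferences_alt]
  by_cases h : (getDifferencesB line).all (fun d => d == 0) <;> simp [h]

theorem loopA_eq_tail (cur : List Int) (acc : List (List Int)) :
    loopA cur acc = acc ++ (getAllDifferences_alt cur).tail := by
  rw [loopA, getAllDifferences_alt]
  simp only [diffA_eq_diffB, hasAllZerosA_eq]
  by_cases h : (getDifferencesB cur).all (fun d => d == 0)
  · simp [h]
  · simp only [h]
    rw [dif_neg (by simp [h]), dif_neg (by simp [h])]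
    rw [loopA_eq_tail (getDifferencesB cur) (acc ++ [getDifferencesB cur])]
    simp only [List.append_assoc, List.singleton_append, List.tail_cons]
    rw [← alt_head]
termination_by cur.length
decreasing_by exact getDifferencesB_length_lt cur (by simpa using h)

-- ===== VERDICT (by name: the statement is the Claim_ definition above) =====
theorem getAllDifferences_spec : Claim_equal_getAllDifferences := by
  intro line _ _
  unfold Spec_getAllDifferences getAllDifferences
  rw [loopA_eq_tail, alt_head line]
  simp

@[simp] theorem getAllDifferences_raises : Claim_raises_getAllDifferences := by
  unfold Claim_raises_getAllDifferences
  refine ⟨fun line _ h => by simp [Raises_getAllDifferences] at h; simp [h, Pre_getAllDifferences],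
    by decide, by decide, ?_⟩
  rw [getAllDifferences_alt]
  decide
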